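-- pv_equiv track=rewrite | github.com/floordiv/zoo | syst/tools/configreader.py | split_by_equality
-- ===== SOURCE A (Python) =====
-- def remove_spaces(text):
--     in_string = False
--     result = ''
--
--     for letter in text:
--         if letter in (' ', '\t') and not in_string:
--             continue
--
--         if letter == '"':
--             in_string = not in_string
--
--         result += letter
--
--     return result
--
-- def split_by_equality(text):
--     text = remove_spaces(text)
--     temp = ['']
--
--     for letter in text:
--         if letter == '=':
--             temp.append('')
--         else:
--             temp[-1] += letter
--
--     return temp
-- ===== SOURCE B (Python) =====
-- def split_by_equality(text):
--     segs = text.split('"')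
--     pieces = [seg if i % 2 == 1 else ''.join(c for c in seg if c not in ' \t')
--               for i, seg in enumerate(segs)]
--     return '"'.join(pieces).split('=')
-- ===== Notes on version B (the rewrite author's own statement) =====
-- stated objective: faster
-- what changed: Replaces the stateful in_string character scan and the manual append/concat '='-loop by a split-on-quote / strip-even-segments / rejoin pipeline followed by str.split('='), eliminating the per-character string concatenation.
import Mathlib
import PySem

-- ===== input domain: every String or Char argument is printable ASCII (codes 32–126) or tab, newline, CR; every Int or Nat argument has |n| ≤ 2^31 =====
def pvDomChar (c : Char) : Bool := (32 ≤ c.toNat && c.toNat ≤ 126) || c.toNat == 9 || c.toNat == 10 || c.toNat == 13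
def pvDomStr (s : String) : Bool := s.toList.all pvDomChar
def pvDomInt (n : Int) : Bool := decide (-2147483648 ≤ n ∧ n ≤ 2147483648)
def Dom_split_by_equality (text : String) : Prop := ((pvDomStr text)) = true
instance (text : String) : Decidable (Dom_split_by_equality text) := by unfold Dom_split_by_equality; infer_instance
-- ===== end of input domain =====

-- B replaces A's stateful in_string scan + manual '='-append loop by split-on-'"' / strip
-- even segments / rejoin, then split('='); same return value, no side effects in either.

-- ===== PORT A =====
-- remove_spaces: foldl over the characters with state (in_string, result)
def removeSpacesA (text : List Char) : List Char :=
  (text.foldl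
    (fun (st : Bool × List Char) letter =>
      if (letter = ' ' ∨ letter = '\t') ∧ st.1 = false then st
      else
        let inString := if letter = '"' then !st.1 else st.1
        (inString, st.2 ++ [letter]))
    (false, [])).2

def split_by_equality (text : String) : List String :=
  let t := removeSpacesA text.toList
  let temp := t.foldl
    (fun (temp : List (List Char)) letter =>
      if letter = '=' then temp ++ [[]]
      else temp.dropLast ++ [(temp.getLast?.getD []) ++ [letter]])
    [[]]
  temp.map String.mk

-- ===== PORT B =====
def split_by_equality_alt (text : String) : List String :=
  let segs := PySem.Chars.splitOn text.toList ['"']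
  let pieces := (PySem.List.enumerate segs 0).map
    (fun p => if p.1 % 2 = 1 then p.2
              -- ''.join(c for c in seg if c not in ' \t'): exact as a filter over the chars
              else p.2.filter (fun c => !(c = ' ' || c = '\t')))
  let stripped := PySem.Chars.join ['"'] pieces
  (PySem.Chars.splitOn stripped ['=']).map String.mk

-- ===== PRECONDITION & SPEC =====
def Spec_split_by_equality (text : String) (out : List String) : Prop := out = split_by_equality_alt text
instance (text : String) (out : List String) : Decidable (Spec_split_by_equality text out) := by unfold Spec_split_by_equality; infer_instance

-- ===== CLAIM (what is proved, stated in full; the proofs are below) =====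
def Claim_equal_split_by_equality : Prop := ∀ (text : String), Dom_split_by_equality text → Spec_split_by_equality text (split_by_equality text)

-- ===== LEMMAS AND PROOFS =====

-- structural single-character split (proof-only characterisation of PySem.Chars.splitOn)
def mySplit (q : Char) : List Char → List (List Char)
  | [] => [[]]
  | c :: cs => if c = q then [] :: mySplit q cs else (mySplit q cs).modifyHead (c :: ·)

-- A's remove_spaces as a structural recursion
def g (b : Bool) : List Char → List Char
  | [] => []
  | c :: cs =>
    if (c = ' ' ∨ c = '\t') ∧ b = false then g b cs
    else c :: g (if c = '"' then !b else b) cs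

def stripST (s : List Char) : List Char := s.filter (fun c => !(c = ' ' || c = '\t'))

def altMap (b : Bool) : List (List Char) → List (List Char)
  | [] => []
  | s :: ss => (if b then s else stripST s) :: altMap (!b) ss

theorem mySplit_ne_nil (q : Char) (cs : List Char) : mySplit q cs ≠ [] := by
  induction cs with
  | nil => simp [mySplit]
  | cons c cs ih =>
    simp only [mySplit]
    split
    · simp
    · cases h : mySplit q cs with
      | nil => exact absurd h ih
      | cons a as => simp

theorem go_spec (q : Char) (l : List Char) : ∀ (fuel : Nat), l.length ≤ fuel →
    ∀ (cur : List Char) (acc : List (List Char)),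
    PySem.Chars.splitOn.go [q] fuel l cur acc
      = acc.reverse ++ (mySplit q l).modifyHead (cur.reverse ++ ·) := by
  induction l with
  | nil =>
    intro fuel _ cur acc
    cases fuel <;> simp [PySem.Chars.splitOn.go, mySplit]
  | cons c rest ih =>
    intro fuel hf cur acc
    cases fuel with
    | zero => simp at hf
    | succ f =>
      have hf' : rest.length ≤ f := by simpa using hf
      by_cases hc : c = q
      · subst hc
        have hpre : List.isPrefixOf [c] (c :: rest) = true := by
          simp [List.isPrefixOf]
        rw [PySem.Chars.splitOn.go]
        simp only [hpre, if_pos, List.length_cons, List.length_nil, List.drop_succ_cons, List.drop_zero]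
        rw [ih f hf' [] (cur.reverse :: acc)]
        cases h : mySplit c rest with
        | nil => exact absurd h (mySplit_ne_nil c rest)
        | cons a as => simp [mySplit, h]
      · have hpre : List.isPrefixOf [q] (c :: rest) = false := by
          simp [List.isPrefixOf]; intro h; exact absurd h.symm hc
        rw [PySem.Chars.splitOn.go]
        simp only [hpre, Bool.false_eq_true, if_false]
        rw [ih f hf' (c :: cur) acc]
        cases h : mySplit q rest with
        | nil => exact absurd h (mySplit_ne_nil q rest)
        | cons a as => simp [mySplit, h, hc]

theorem splitOn_eq_mySplit (q : Char) (cs : List Char) :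
    PySem.Chars.splitOn cs [q] = mySplit q cs := by
  unfold PySem.Chars.splitOn
  rw [go_spec q cs (cs.length + 1) (by omega) [] []]
  cases h : mySplit q cs with
  | nil => exact absurd h (mySplit_ne_nil q cs)
  | cons a as => simp

-- A's '='-loop computes mySplit '='
theorem eqloop_spec (cs : List Char) : ∀ (acc : List (List Char)) (cur : List Char),
    cs.foldl
      (fun (temp : List (List Char)) letter =>
        if letter = '=' then temp ++ [[]]
        else temp.dropLast ++ [(temp.getLast?.getD []) ++ [letter]])
      (acc ++ [cur])
      = acc ++ (mySplit '=' cs).modifyHead (cur ++ ·) := by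
  induction cs with
  | nil => intro acc cur; simp [mySplit]
  | cons c rest ih =>
    intro acc cur
    by_cases hc : c = '='
    · subst hc
      simp only [List.foldl_cons, reduceIte, List.append_assoc]
      rw [← List.append_assoc, ih (acc ++ [cur]) []]
      cases h : mySplit '=' rest with
      | nil => exact absurd h (mySplit_ne_nil _ rest)
      | cons a as => simp [mySplit, h]
    · simp only [List.foldl_cons, if_neg hc, List.dropLast_concat,
        List.getLast?_concat, Option.getD_some]
      rw [ih acc (cur ++ [c])]
      cases h : mySplit '=' rest with
      | nil => exact absurd h (mySplit_ne_nil _ rest)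
      | cons a as => simp [mySplit, h, hc]

-- A's remove_spaces fold equals g
theorem removeFold_spec (cs : List Char) : ∀ (b : Bool) (res : List Char),
    (cs.foldl
      (fun (st : Bool × List Char) letter =>
        if (letter = ' ' ∨ letter = '\t') ∧ st.1 = false then st
        else
          let inString := if letter = '"' then !st.1 else st.1
          (inString, st.2 ++ [letter]))
      (b, res)).2 = res ++ g b cs := by
  induction cs with
  | nil => intro b res; simp [g]
  | cons c rest ih =>
    intro b res
    simp only [List.foldl_cons]
    by_cases h : (c = ' ' ∨ c = '\t') ∧ b = false
    · rw [if_pos h, ih b res]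
      simp [g, h]
    · rw [if_neg h]
      rw [ih]
      simp [g, h]

theorem join_modifyHead (c : Char) (sep : List Char) (p : List Char) (ps : List (List Char)) :
    PySem.Chars.join sep (((p :: ps)).modifyHead (c :: ·)) = c :: PySem.Chars.join sep (p :: ps) := by
  cases ps with
  | nil => simp [PySem.Chars.join, List.intercalate]
  | cons q qs =>
    simp only [List.modifyHead]
    rw [PySem.Chars.join_cons_cons, PySem.Chars.join_cons_cons]
    simp

-- B's strip/rejoin over the quote split equals g
theorem join_altMap_spec (cs : List Char) : ∀ (b : Bool),
    PySem.Chars.join ['"'] (altMap b (mySplit '"' cs)) = g b cs := by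
  induction cs with
  | nil =>
    intro b
    cases b <;> simp [mySplit, altMap, stripST, g, PySem.Chars.join, List.intercalate]
  | cons c rest ih =>
    intro b
    by_cases hq : c = '"'
    · subst hq
      simp only [mySplit, reduceIte, altMap]
      cases h : altMap (!b) (mySplit '"' rest) with
      | nil =>
        exfalso
        have := mySplit_ne_nil '"' rest
        cases hm : mySplit '"' rest with
        | nil => exact this hm
        | cons a as => rw [hm] at h; simp [altMap] at h
      | cons a as =>
        have hb : (if b then ([] : List Char) else stripST []) = [] := by
          cases b <;> simp [stripST]
        rw [hb, PySem.Chars.join_cons_cons, ← h, ih (!b)]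
        have hg : g b ('"' :: rest) = '"' :: g (!b) rest := by
          simp [g]
        rw [hg]; simp
    · simp only [mySplit, hq, if_false]
      cases h : mySplit '"' rest with
      | nil => exact absurd h (mySplit_ne_nil _ rest)
      | cons s t =>
        simp only [List.modifyHead, altMap]
        cases b with
        | false =>
          rw [if_neg Bool.false_ne_true]
          simp only [Bool.not_false]
          by_cases hst : c = ' ' ∨ c = '\t'
          · have h1 : stripST (c :: s) = stripST s := by
              rcases hst with h' | h' <;> subst h' <;> simp [stripST]
            rw [h1]
            have : g false (c :: rest) = g false rest := by
              simp [g, hst]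
            rw [this, ← ih false, h]; simp [altMap]
          · have h1 : stripST (c :: s) = c :: stripST s := by
              push_neg at hst
              simp [stripST, hst.1, hst.2]
            rw [h1]
            have h2 : (c :: stripST s) :: altMap true t
                = ((stripST s :: altMap true t)).modifyHead (c :: ·) := by simp
            rw [h2, join_modifyHead]
            have h3 : stripST s :: altMap true t = altMap false (mySplit '"' rest) := by
              rw [h]; simp [altMap]
            rw [h3, ih false]
            have : g false (c :: rest) = c :: g false rest := by
              push_neg at hst
              simp [g, hst.1, hst.2, hq]
            rw [this]
        | true =>
          rw [if_pos rfl]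
          simp only [Bool.not_true]
          have h2 : (c :: s) :: altMap false t
              = ((s :: altMap false t)).modifyHead (c :: ·) := by simp
          rw [h2, join_modifyHead]
          have h3 : s :: altMap false t = altMap true (mySplit '"' rest) := by
            rw [h]; simp [altMap]
          rw [h3, ih true]
          have : g true (c :: rest) = c :: g true rest := by
            simp [g, hq]
          rw [this]

-- B's enumerate/parity map equals altMap
theorem enum_altMap (segs : List (List Char)) : ∀ (n : Int),
    (PySem.List.enumerate segs n).map
      (fun p => if p.1 % 2 = 1 then p.2 else p.2.filter (fun c => !(c = ' ' || c = '\t')))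
      = altMap (decide (n % 2 = 1)) segs := by
  induction segs with
  | nil => intro n; simp [PySem.List.enumerate, altMap]
  | cons s ss ih =>
    intro n
    rw [PySem.List.enumerate_cons]
    simp only [List.map_cons]
    rw [ih (n + 1)]
    have hpar : (decide ((n + 1) % 2 = 1)) = !(decide (n % 2 = 1)) := by
      by_cases h : n % 2 = 1
      · have : (n + 1) % 2 = 0 := by omega
        simp [h, this]
      · have : (n + 1) % 2 = 1 := by omega
        simp [h, this]
    rw [hpar]
    simp only [altMap, stripST]
    by_cases h : n % 2 = 1 <;> simp [h]

-- ===== VERDICT (by name: the statement is the Claim_ definition above) =====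
theorem split_by_equality_spec : Claim_equal_split_by_equality := by
  intro text _
  unfold Spec_split_by_equality split_by_equality split_by_equality_alt removeSpacesA
  simp only []
  rw [removeFold_spec text.toList false []]
  have hA : ∀ cs, cs.foldl
      (fun (temp : List (List Char)) letter =>
        if letter = '=' then temp ++ [[]]
        else temp.dropLast ++ [(temp.getLast?.getD []) ++ [letter]])
      [[]] = mySplit '=' cs := by
    intro cs
    have := eqloop_spec cs [] []
    simp only [List.nil_append] at this
    rw [this]
    cases h : mySplit '=' cs with
    | nil => exact absurd h (mySplit_ne_nil _ cs)
    | cons a as => simp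
  rw [hA, splitOn_eq_mySplit, splitOn_eq_mySplit]
  rw [enum_altMap (mySplit '"' text.toList) 0]
  rw [show (decide ((0 : Int) % 2 = 1)) = false from by decide]
  rw [join_altMap_spec]
  simp only [List.nil_append]
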